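-- pv_equiv track=rewrite | github.com/willjrowe/algorithmDesign | kClustering.py | findSpacing
-- ===== SOURCE A (Python) =====
-- def findSpacing(graph,cluster):
--     minSpacing = 100 #start min spacing higher than highest possible edge weight
--     for i in range(0,len(cluster)): #for each cluster
--         for j in range(0,len(cluster[i])): #for each point in this cluster
--             currPoint = cluster[i][j]
--             for k in range(i+1,len(cluster)): #look at each other cluster
--                 for w in range(0,len(cluster[k])): #for each point in this other cluster
--                     otherPoint = cluster[k][w]
--                     if graph[currPoint][otherPoint] < minSpacing:
--                         minSpacing = graph[currPoint][otherPoint]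
--     return minSpacing
-- ===== SOURCE B (Python) =====
-- def findSpacing(graph, cluster):
--     # Flatten the nested clusters once into (point, clusterIndex) pairs, then a
--     # single double loop over index pairs a < b replaces A's four nested loops.
--     flat = [(p, ci) for ci, c in enumerate(cluster) for p in c]
--     best = 100
--     for a in range(len(flat)):
--         pa, la = flat[a]
--         for b in range(a + 1, len(flat)):
--             pb, lb = flat[b]
--             if la != lb:
--                 best = min(best, graph[pa][pb])
--     return best
-- ===== Notes on version B (the rewrite author's own statement) =====
-- stated objective: alternative
-- what changed: Replaces A's four nested loops over the nested cluster structure with a single flattening pass into (point, clusterIndex) pairs followed by one double loop over index pairs with a cluster-label inequality test, folding the running minimum with min().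
import Mathlib
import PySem

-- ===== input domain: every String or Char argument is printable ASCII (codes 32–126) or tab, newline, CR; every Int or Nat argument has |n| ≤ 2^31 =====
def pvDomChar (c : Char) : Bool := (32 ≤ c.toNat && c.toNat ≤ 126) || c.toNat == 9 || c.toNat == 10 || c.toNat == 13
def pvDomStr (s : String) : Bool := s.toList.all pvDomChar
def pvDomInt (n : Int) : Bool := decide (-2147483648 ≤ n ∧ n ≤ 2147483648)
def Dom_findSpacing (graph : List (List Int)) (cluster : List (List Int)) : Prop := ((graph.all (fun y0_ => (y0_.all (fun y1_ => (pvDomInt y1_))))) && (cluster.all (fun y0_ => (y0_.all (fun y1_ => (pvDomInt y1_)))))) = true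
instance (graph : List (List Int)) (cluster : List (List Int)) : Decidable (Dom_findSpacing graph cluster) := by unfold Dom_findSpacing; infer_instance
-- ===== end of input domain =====

-- B flattens the nested clusters into (point, clusterIndex) pairs and runs one
-- double loop over index pairs with a label-inequality test (alternative
-- decomposition, same asymptotic cost).

-- ===== PORT A =====
-- graph[currPoint][otherPoint]; total via defaults, exact under Pre_ (all cross accesses in range)
def pvGVal (graph : List (List Int)) (p q : Int) : Int :=
  PySem.List.pyGetD (PySem.List.pyGetD graph p []) q 0

def findSpacing (graph : List (List Int)) (cluster : List (List Int)) : Int :=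
  (PySem.List.pyRange 0 (cluster.length : Int) 1).foldl (fun minSpacing i =>
    let ci := PySem.List.pyGetD cluster i []
    (PySem.List.pyRange 0 (ci.length : Int) 1).foldl (fun minSpacing j =>
      let currPoint := PySem.List.pyGetD ci j 0
      (PySem.List.pyRange (i + 1) (cluster.length : Int) 1).foldl (fun minSpacing k =>
        let ck := PySem.List.pyGetD cluster k []
        (PySem.List.pyRange 0 (ck.length : Int) 1).foldl (fun minSpacing w =>
          let otherPoint := PySem.List.pyGetD ck w 0
          if pvGVal graph currPoint otherPoint < minSpacing then
            pvGVal graph currPoint otherPoint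
          else minSpacing) minSpacing) minSpacing) minSpacing) 100

-- ===== PORT B =====
-- flat = [(p, ci) for ci, c in enumerate(cluster) for p in c]
def pvFlat (cluster : List (List Int)) : List (Int × Int) :=
  (PySem.List.enumerate cluster).flatMap (fun ic => ic.2.map (fun p => (p, ic.1)))

def findSpacing_alt (graph : List (List Int)) (cluster : List (List Int)) : Int :=
  let flat := pvFlat cluster
  (PySem.List.pyRange 0 (flat.length : Int) 1).foldl (fun best a =>
    let pa := PySem.List.pyGetD flat a (0, 0)
    (PySem.List.pyRange (a + 1) (flat.length : Int) 1).foldl (fun best b =>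
      let pb := PySem.List.pyGetD flat b (0, 0)
      if pa.2 ≠ pb.2 then min best (pvGVal graph pa.1 pb.1) else best) best) 100

-- ===== PRECONDITION & SPEC =====
-- Pre_: every cross-cluster access graph[p][q] (p from an earlier cluster, q from a
-- later one) is in range — exactly the inputs where Python A returns (no IndexError).
def pvOkAccess (graph : List (List Int)) (p q : Int) : Bool :=
  match PySem.List.pyGet? graph p with
  | some row => decide (PySem.Raise.InRange row.length q)
  | none => false

def Pre_findSpacing (graph : List (List Int)) (cluster : List (List Int)) : Prop :=
  List.Pairwise (fun c1 c2 => ∀ p ∈ c1, ∀ q ∈ c2, pvOkAccess graph p q = true) cluster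

instance (graph : List (List Int)) (cluster : List (List Int)) : Decidable (Pre_findSpacing graph cluster) := by
  unfold Pre_findSpacing; infer_instance

def pvWitness_findSpacing : List (List Int) × List (List Int) :=
  ([[0, 5], [5, 0]], [[0], [1]])

def Spec_findSpacing (graph : List (List Int)) (cluster : List (List Int)) (out : Int) : Prop := out = findSpacing_alt graph cluster
instance (graph : List (List Int)) (cluster : List (List Int)) (out : Int) : Decidable (Spec_findSpacing graph cluster out) := by unfold Spec_findSpacing; infer_instance

-- ===== CLAIM (what is proved, stated in full; the proofs are below) =====
def Claim_equal_findSpacing : Prop := ∀ (graph : List (List Int)) (cluster : List (List Int)), Dom_findSpacing graph cluster → Pre_findSpacing graph cluster → Spec_findSpacing graph cluster (findSpacing graph cluster)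

-- ===== LEMMAS AND PROOFS =====

-- generic structural form of "for index a; use xs[a] and the suffix xs[a+1:]"
def pvGenLoop {α : Type} (F : Int → α → List α → Int) : List α → Int → Int
  | [], m => m
  | x :: r, m => pvGenLoop F r (F m x r)

theorem pvOuter_eq {α : Type} (F : Int → α → List α → Int) (d : α) (xs : List α) :
    ∀ (n k : ℕ) (m : Int), xs.length ≤ k + n →
      (PySem.List.pyRange (k : Int) (xs.length : Int) 1).foldl
        (fun m j => F m (PySem.List.pyGetD xs j d) (xs.drop (j + 1).toNat)) m
      = pvGenLoop F (xs.drop k) m := by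
  intro n
  induction n with
  | zero =>
      intro k m hk
      have h1 : (xs.length : Int) ≤ (k : Int) := by omega
      rw [PySem.List.pyRange_one_eq_nil h1, List.drop_eq_nil_of_le (by omega)]
      rfl
  | succ n ih =>
      intro k m hk
      by_cases hlt : k < xs.length
      · have hcons : PySem.List.pyRange (k : Int) (xs.length : Int) 1
            = (k : Int) :: PySem.List.pyRange ((k : Int) + 1) (xs.length : Int) 1 :=
          PySem.List.pyRange_one_cons (by omega)
        rw [hcons]
        simp only [List.foldl_cons]
        have hget : PySem.List.pyGetD xs (k : Int) d = xs[k] := by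
          rw [PySem.List.pyGetD_natCast]
          exact List.getD_eq_getElem xs d hlt
        have hdropk : xs.drop k = xs[k] :: xs.drop (k + 1) :=
          List.drop_eq_getElem_cons hlt
        have htn : (((k : Int)) + 1).toNat = k + 1 := by omega
        have hcast : ((k : Int)) + 1 = ((k + 1 : ℕ) : Int) := by push_cast; ring
        rw [hget, htn, hcast, ih (k + 1) _ (by omega), hdropk]
        rfl
      · have h1 : (xs.length : Int) ≤ (k : Int) := by omega
        rw [PySem.List.pyRange_one_eq_nil h1, List.drop_eq_nil_of_le (by omega)]
        rfl

-- the per-cluster body of A, structurally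
def pvFA (graph : List (List Int)) (m : Int) (c : List Int) (rest : List (List Int)) : Int :=
  c.foldl (fun m p =>
    rest.foldl (fun m ck =>
      ck.foldl (fun m q =>
        if pvGVal graph p q < m then pvGVal graph p q else m) m) m) m

-- the per-flat-element body of B, structurally
def pvFB (graph : List (List Int)) (m : Int) (x : Int × Int) (rest : List (Int × Int)) : Int :=
  rest.foldl (fun m y => if x.2 ≠ y.2 then min m (pvGVal graph x.1 y.1) else m) m

theorem findSpacing_eq_genLoop (graph cluster : List (List Int)) :
    findSpacing graph cluster = pvGenLoop (pvFA graph) cluster 100 := by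
  unfold findSpacing
  refine Eq.trans
    (PySem.List.foldl_congr_mem _ _
      (fun m i => pvFA graph m (PySem.List.pyGetD cluster i [])
        (cluster.drop (i + 1).toNat)) 100
      (fun m i hi => ?_))
    (pvOuter_eq (pvFA graph) ([] : List Int) cluster cluster.length 0 100 (by omega))
  have hi0 : (0 : Int) ≤ i := (PySem.List.mem_pyRange_one.mp hi).1
  simp only
  refine Eq.trans
    (PySem.List.foldl_pyRange_zero_pyGetD' (PySem.List.pyGetD cluster i []) 0
      (fun m p =>
        (PySem.List.pyRange (i + 1) (cluster.length : Int) 1).foldl (fun m k =>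
          let ck := PySem.List.pyGetD cluster k []
          (PySem.List.pyRange 0 (ck.length : Int) 1).foldl (fun m w =>
            let q := PySem.List.pyGetD ck w 0
            if pvGVal graph p q < m then pvGVal graph p q else m) m) m) m)
    ?_
  refine PySem.List.foldl_congr_mem _ _ _ m (fun acc p _ => ?_)
  refine Eq.trans
    (PySem.List.foldl_pyRange_pyGetD' cluster ([] : List Int)
      (fun m ck =>
        (PySem.List.pyRange 0 (ck.length : Int) 1).foldl (fun m w =>
          let q := PySem.List.pyGetD ck w 0
          if pvGVal graph p q < m then pvGVal graph p q else m) m) acc (by omega))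
    ?_
  refine PySem.List.foldl_congr_mem _ _ _ acc (fun acc2 ck _ => ?_)
  exact PySem.List.foldl_pyRange_zero_pyGetD' ck 0
    (fun m q => if pvGVal graph p q < m then pvGVal graph p q else m) acc2

theorem findSpacing_alt_eq_genLoop (graph cluster : List (List Int)) :
    findSpacing_alt graph cluster = pvGenLoop (pvFB graph) (pvFlat cluster) 100 := by
  unfold findSpacing_alt
  simp only
  refine Eq.trans
    (PySem.List.foldl_congr_mem _ _
      (fun m a => pvFB graph m (PySem.List.pyGetD (pvFlat cluster) a (0, 0))
        ((pvFlat cluster).drop (a + 1).toNat)) 100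
      (fun m a ha => ?_))
    (pvOuter_eq (pvFB graph) ((0, 0) : Int × Int) (pvFlat cluster)
      (pvFlat cluster).length 0 100 (by omega))
  have ha0 : (0 : Int) ≤ a := (PySem.List.mem_pyRange_one.mp ha).1
  simp only
  exact PySem.List.foldl_pyRange_pyGetD' (pvFlat cluster) ((0, 0) : Int × Int)
    (fun m y =>
      if (PySem.List.pyGetD (pvFlat cluster) a (0, 0)).2 ≠ y.2 then
        min m (pvGVal graph (PySem.List.pyGetD (pvFlat cluster) a (0, 0)).1 y.1)
      else m) m (by omega)

-- flatten with labels starting at s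
def pvFlatL (s : Int) : List (List Int) → List (Int × Int)
  | [] => []
  | c :: rest => c.map (fun p => (p, s)) ++ pvFlatL (s + 1) rest

theorem pvFlat_eq_flatL (cluster : List (List Int)) :
    pvFlat cluster = pvFlatL 0 cluster := by
  unfold pvFlat
  suffices h : ∀ (s : Int), (PySem.List.enumerate cluster s).flatMap
      (fun ic => ic.2.map (fun p => (p, ic.1))) = pvFlatL s cluster by
    exact h 0
  induction cluster with
  | nil => intro s; simp [PySem.List.enumerate_nil, pvFlatL]
  | cons c rest ih =>
      intro s
      rw [PySem.List.enumerate_cons]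
      simp only [List.flatMap_cons, pvFlatL, ih (s + 1)]

theorem pvFlatL_label_ge (cluster : List (List Int)) :
    ∀ (s : Int) (y : Int × Int), y ∈ pvFlatL s cluster → s ≤ y.2 := by
  induction cluster with
  | nil => intro s y hy; simp [pvFlatL] at hy
  | cons c rest ih =>
      intro s y hy
      simp only [pvFlatL, List.mem_append, List.mem_map] at hy
      rcases hy with ⟨p, _, rfl⟩ | hy
      · exact le_refl s
      · have := ih (s + 1) y hy; omega

-- fold over labeled points with a function depending only on the point
theorem pvFoldl_flatL_fst (h : Int → Int → Int) (cluster : List (List Int)) :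
    ∀ (s : Int) (m : Int),
      (pvFlatL s cluster).foldl (fun m y => h m y.1) m = cluster.flatten.foldl h m := by
  induction cluster with
  | nil => intro s m; simp [pvFlatL]
  | cons c rest ih =>
      intro s m
      simp only [pvFlatL, List.foldl_append, List.foldl_map, List.flatten_cons, ih (s + 1)]

-- the inner accumulation both sides reduce to
def pvInner (graph : List (List Int)) (p : Int) (qs : List Int) (m : Int) : Int :=
  qs.foldl (fun m q => min m (pvGVal graph p q)) m

theorem pvFA_eq_inner (graph : List (List Int)) (m : Int) (c : List Int) (rest : List (List Int)) :
    pvFA graph m c rest = c.foldl (fun m p => pvInner graph p rest.flatten m) m := by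
  unfold pvFA pvInner
  refine PySem.List.foldl_congr_mem _ _ _ m (fun acc p _ => ?_)
  rw [List.foldl_flatten]
  refine PySem.List.foldl_congr_mem _ _ _ acc (fun acc2 ck _ => ?_)
  refine PySem.List.foldl_congr_mem _ _ _ acc2 (fun acc3 q _ => ?_)
  simp only [min_def]
  split_ifs with h1 h2 h2 <;> omega

theorem pvFB_split (graph : List (List Int)) (m : Int) (p s : Int)
    (r : List (Int × Int)) (rest : List (List Int))
    (hr : ∀ y ∈ r, y.2 = s) :
    pvFB graph m (p, s) (r ++ pvFlatL (s + 1) rest) = pvInner graph p rest.flatten m := by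
  unfold pvFB
  rw [List.foldl_append]
  have hnoop : r.foldl (fun m y => if (p, s).2 ≠ y.2 then min m (pvGVal graph p y.1) else m) m = m := by
    induction r with
    | nil => rfl
    | cons y r' ih' =>
        have hy : y.2 = s := hr y (List.mem_cons_self)
        simp only [List.foldl_cons, hy, ne_eq, not_true_eq_false, if_false]
        exact ih' (fun z hz => hr z (List.mem_cons_of_mem y hz))
  rw [hnoop]
  refine Eq.trans
    (PySem.List.foldl_congr_mem _ _ (fun m y => min m (pvGVal graph p y.1)) m
      (fun acc y hy => ?_))
    (pvFoldl_flatL_fst (fun m q => min m (pvGVal graph p q)) rest (s + 1) m)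
  have hge := pvFlatL_label_ge rest (s + 1) y hy
  have hne : (p, s).2 ≠ y.2 := by show s ≠ y.2; omega
  rw [if_pos hne]

-- pvGenLoop over (as ++ bs): process the prefix (seeing the suffix), then the suffix
def pvGenLoopAux {α : Type} (F : Int → α → List α → Int) : List α → List α → Int → Int
  | [], _, m => m
  | x :: r, bs, m => pvGenLoopAux F r bs (F m x (r ++ bs))

theorem pvGenLoop_append {α : Type} (F : Int → α → List α → Int) :
    ∀ (as bs : List α) (m : Int),
      pvGenLoop F (as ++ bs) m = pvGenLoop F bs (pvGenLoopAux F as bs m) := by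
  intro as
  induction as with
  | nil => intro bs m; rfl
  | cons x r ih =>
      intro bs m
      simp only [List.cons_append, pvGenLoop, pvGenLoopAux]
      exact ih bs (F m x (r ++ bs))

theorem pvAux_eq_foldl (graph : List (List Int)) (s : Int) (rest : List (List Int)) :
    ∀ (c : List Int) (m : Int),
      pvGenLoopAux (pvFB graph) (c.map (fun p => (p, s))) (pvFlatL (s + 1) rest) m
      = c.foldl (fun m p => pvInner graph p rest.flatten m) m := by
  intro c
  induction c with
  | nil => intro m; rfl
  | cons p c' ih =>
      intro m
      simp only [List.map_cons, pvGenLoopAux, List.foldl_cons]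
      rw [pvFB_split graph m p s (c'.map (fun p => (p, s))) rest
        (by intro y hy; rcases List.mem_map.mp hy with ⟨z, _, rfl⟩; rfl)]
      exact ih (pvInner graph p rest.flatten m)

theorem pvMain (graph : List (List Int)) (cluster : List (List Int)) :
    ∀ (s : Int) (m : Int),
      pvGenLoop (pvFB graph) (pvFlatL s cluster) m = pvGenLoop (pvFA graph) cluster m := by
  induction cluster with
  | nil => intro s m; rfl
  | cons c rest ih =>
      intro s m
      simp only [pvFlatL, pvGenLoop]
      rw [pvGenLoop_append, pvAux_eq_foldl graph s rest c m, ih (s + 1)]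
      rw [pvFA_eq_inner]

-- ===== VERDICT (by name: the statement is the Claim_ definition above) =====
theorem findSpacing_spec : Claim_equal_findSpacing := by
  intro graph cluster hdom hpre
  unfold Spec_findSpacing
  rw [findSpacing_eq_genLoop, findSpacing_alt_eq_genLoop, pvFlat_eq_flatL]
  exact (pvMain graph cluster 0 100).symm
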